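-- pv_equiv track=rewrite | github.com/SumaDodo/C-concepts | Artificial Intelligence - HackerRank/bot_saves_princess.py | displayPathtoPrincess
-- ===== SOURCE A (Python) =====
-- def displayPathtoPrincess(n,grid):
-- #print all the moves here
--     for idx,row in enumerate(grid):
--         if 'p' in row:
--             princess = (idx, row.index('p'))
--         if 'm' in row:
--             bot = (idx, row.index('m'))
--
--     row_val = princess[0] - bot[0] #if negative then up
--     col_val = princess[1] - bot[1] #if negative then left
--
--     return ''.join([
--     'UP\n' * abs(row_val) if row_val < 0 else 'DOWN\n'* abs(row_val),
--     'LEFT\n'*abs(col_val) if col_val < 0 else 'RIGHT\n'* abs(col_val)])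
-- ===== SOURCE B (Python) =====
-- def _find_last(grid, ch):
--     pos = None
--     for idx, row in enumerate(grid):
--         if ch in row:
--             pos = (idx, row.index(ch))
--     return pos
--
--
-- def _walk(cur, target, neg_move, pos_move):
--     moves = []
--     while cur != target:
--         if cur > target:
--             moves.append(neg_move)
--             cur -= 1
--         else:
--             moves.append(pos_move)
--             cur += 1
--     return moves
--
--
-- def displayPathtoPrincess(n, grid):
--     princess = _find_last(grid, 'p')
--     bot = _find_last(grid, 'm')
--     return ''.join(_walk(bot[0], princess[0], 'UP\n', 'DOWN\n')
--                    + _walk(bot[1], princess[1], 'LEFT\n', 'RIGHT\n'))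
-- ===== Notes on version B (the rewrite author's own statement) =====
-- stated objective: alternative
-- what changed: Replaces the delta-and-string-multiplication arithmetic with a one-cell-at-a-time simulated walk (two while loops appending single moves) joined at the end; the grid scan is kept identical.
import Mathlib
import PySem

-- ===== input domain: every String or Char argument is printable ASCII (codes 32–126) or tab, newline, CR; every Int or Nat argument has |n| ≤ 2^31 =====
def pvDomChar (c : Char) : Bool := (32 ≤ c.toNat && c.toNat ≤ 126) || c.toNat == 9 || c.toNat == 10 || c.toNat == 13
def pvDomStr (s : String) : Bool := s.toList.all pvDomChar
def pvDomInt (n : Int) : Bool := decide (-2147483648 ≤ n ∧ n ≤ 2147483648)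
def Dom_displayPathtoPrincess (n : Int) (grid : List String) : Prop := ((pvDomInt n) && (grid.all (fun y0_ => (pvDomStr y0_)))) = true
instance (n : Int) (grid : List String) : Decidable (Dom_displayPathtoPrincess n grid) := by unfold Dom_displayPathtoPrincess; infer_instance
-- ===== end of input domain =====

-- B replaces A's delta/string-multiplication arithmetic with a one-cell-at-a-time simulated walk (alternative decomposition, same cost).

-- ===== PORT A =====
-- the for-loop's two conditional assignments; princess/bot start unassigned (Option none)
def pvScanA (grid : List String) : Option (Int × Int) × Option (Int × Int) :=
  (PySem.List.enumerate grid).foldl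
    (fun st p =>
      let st1 := if PySem.Str.isIn "p" p.2 then (some (p.1, PySem.Str.find p.2 "p"), st.2) else st
      if PySem.Str.isIn "m" p.2 then (st1.1, some (p.1, PySem.Str.find p.2 "m")) else st1)
    (none, none)

def displayPathtoPrincess (n : Int) (grid : List String) : String :=
  match pvScanA grid with
  | (some princess, some bot) =>
    let row_val : Int := princess.1 - bot.1
    let col_val : Int := princess.2 - bot.2
    String.ofList
      ((if row_val < 0 then PySem.List.pyRepeat "UP\n".toList |row_val|
        else PySem.List.pyRepeat "DOWN\n".toList |row_val|) ++
       (if col_val < 0 then PySem.List.pyRepeat "LEFT\n".toList |col_val|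
        else PySem.List.pyRepeat "RIGHT\n".toList |col_val|))
  | _ => ""  -- unreachable under Pre_ (Python raises NameError here)

-- ===== PORT B =====
-- Source B's _walk: step one cell at a time towards the target, collecting moves
def pvWalk (cur target : Int) (negMove posMove : List Char) : List Char :=
  if cur = target then []
  else if cur > target then negMove ++ pvWalk (cur - 1) target negMove posMove
  else posMove ++ pvWalk (cur + 1) target negMove posMove
termination_by (target - cur).natAbs
decreasing_by all_goals omega

-- Source B's _find_last: position of the marker in the last row that contains it (first column there)
def pvFindLast (grid : List String) (ch : String) : Option (Int × Int) :=
  (PySem.List.enumerate grid).foldl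
    (fun pos p => if PySem.Str.isIn ch p.2 then some (p.1, PySem.Str.find p.2 ch) else pos) none

def displayPathtoPrincess_alt (n : Int) (grid : List String) : String :=
  match pvFindLast grid "p" with
  | none => ""  -- unreachable under Pre_ (Python raises TypeError here)
  | some princess =>
    match pvFindLast grid "m" with
    | none => ""  -- unreachable under Pre_ (Python raises TypeError here)
    | some bot =>
      String.ofList (pvWalk bot.1 princess.1 "UP\n".toList "DOWN\n".toList ++
                     pvWalk bot.2 princess.2 "LEFT\n".toList "RIGHT\n".toList)

-- ===== PRECONDITION & SPEC =====
-- Pre_ excludes grids missing a 'p' or an 'm' marker: there Python A raises NameError (and B raises TypeError).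
def Pre_displayPathtoPrincess (n : Int) (grid : List String) : Prop :=
  grid.any (fun r => PySem.Str.isIn "p" r) = true ∧ grid.any (fun r => PySem.Str.isIn "m" r) = true
instance (n : Int) (grid : List String) : Decidable (Pre_displayPathtoPrincess n grid) := by
  unfold Pre_displayPathtoPrincess; infer_instance

def pvWitness_displayPathtoPrincess : Int × List String := (3, ["---", "-m-", "p--"])

def Spec_displayPathtoPrincess (n : Int) (grid : List String) (out : String) : Prop := out = displayPathtoPrincess_alt n grid
instance (n : Int) (grid : List String) (out : String) : Decidable (Spec_displayPathtoPrincess n grid out) := by unfold Spec_displayPathtoPrincess; infer_instance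

-- ===== CLAIM (what is proved, stated in full; the proofs are below) =====
def Claim_equal_displayPathtoPrincess : Prop := ∀ (n : Int) (grid : List String), Dom_displayPathtoPrincess n grid → Pre_displayPathtoPrincess n grid → Spec_displayPathtoPrincess n grid (displayPathtoPrincess n grid)

-- ===== LEMMAS AND PROOFS =====

-- A's combined scan is the pair of B's two independent last-occurrence scans
theorem pvScanA_split_aux (grid : List String) (start : Int)
    (stp stm : Option (Int × Int)) :
    (PySem.List.enumerate grid start).foldl
      (fun st p =>
        let st1 := if PySem.Str.isIn "p" p.2 then (some (p.1, PySem.Str.find p.2 "p"), st.2) else st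
        if PySem.Str.isIn "m" p.2 then (st1.1, some (p.1, PySem.Str.find p.2 "m")) else st1)
      (stp, stm) =
    ((PySem.List.enumerate grid start).foldl
      (fun pos p => if PySem.Str.isIn "p" p.2 then some (p.1, PySem.Str.find p.2 "p") else pos) stp,
     (PySem.List.enumerate grid start).foldl
      (fun pos p => if PySem.Str.isIn "m" p.2 then some (p.1, PySem.Str.find p.2 "m") else pos) stm) := by
  induction grid generalizing start stp stm with
  | nil => simp [PySem.List.enumerate]
  | cons r rest ih =>
    simp only [PySem.List.enumerate, List.foldl_cons]
    rw [← ih]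
    congr 1
    by_cases hp : PySem.Str.isIn "p" r = true <;>
      by_cases hm : PySem.Str.isIn "m" r = true <;>
        simp at hp hm <;> simp [hp, hm]

theorem pvScanA_split (grid : List String) :
    pvScanA grid = (pvFindLast grid "p", pvFindLast grid "m") :=
  pvScanA_split_aux grid 0 none none

-- the walk produces exactly A's repeated-move string
theorem pvWalk_eq (negMove posMove : List Char) (cur target : Int) :
    pvWalk cur target negMove posMove =
      (if target - cur < 0 then PySem.List.pyRepeat negMove |target - cur|
       else PySem.List.pyRepeat posMove |target - cur|) := by
  generalize hk : (target - cur).natAbs = k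
  induction k generalizing cur with
  | zero =>
    have h : cur = target := by omega
    subst h
    simp [pvWalk, PySem.List.pyRepeat, abs_zero]
  | succ k ih =>
    rw [pvWalk]
    have hrep : ∀ (mv : List Char), PySem.List.pyRepeat mv ((k : Int) + 1) = mv ++ PySem.List.pyRepeat mv (k : Int) := by
      intro mv
      have h1 : ((k : Int) + 1).toNat = k + 1 := by omega
      simp [PySem.List.pyRepeat, h1, List.replicate_succ]
    by_cases hgt : cur > target
    · have h1 : (target - (cur - 1)).natAbs = k := by omega
      rw [if_neg (by omega), if_pos hgt, ih (cur - 1) h1]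
      rw [if_pos (by omega : target - cur < 0), abs_of_nonpos (by omega : target - cur ≤ 0),
        (by omega : -(target - cur) = (k : Int) + 1), hrep]
      by_cases hc : target - (cur - 1) < 0
      · rw [if_pos hc, abs_of_nonpos (by omega), (by omega : -(target - (cur - 1)) = (k : Int))]
      · have hk0 : (k : Int) = 0 := by omega
        have hz : target - (cur - 1) = 0 := by omega
        rw [if_neg hc, hz, hk0]
        simp [PySem.List.pyRepeat]
    · have hlt : cur < target := by omega
      have h1 : (target - (cur + 1)).natAbs = k := by omega
      rw [if_neg (by omega), if_neg (by omega), ih (cur + 1) h1]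
      rw [if_neg (by omega : ¬ target - cur < 0), abs_of_nonneg (by omega : (0:Int) ≤ target - cur),
        (by omega : target - cur = (k : Int) + 1), hrep]
      by_cases hc : target - (cur + 1) < 0
      · exact absurd hc (by omega)
      · rw [if_neg hc, abs_of_nonneg (by omega), (by omega : target - (cur + 1) = (k : Int))]

-- under Pre_, the scan finds both markers
theorem pvFindLast_isSome (grid : List String) (ch : String) (start : Int)
    (st : Option (Int × Int))
    (h : grid.any (fun r => PySem.Str.isIn ch r) = true ∨ st.isSome) :
    ((PySem.List.enumerate grid start).foldl
      (fun pos p => if PySem.Str.isIn ch p.2 then some (p.1, PySem.Str.find p.2 ch) else pos)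
      st).isSome := by
  induction grid generalizing start st with
  | nil =>
    simp only [PySem.List.enumerate, List.foldl_nil]
    rcases h with h | h
    · simp at h
    · exact h
  | cons r rest ih =>
    simp only [PySem.List.enumerate, List.foldl_cons]
    apply ih
    simp only [List.any_cons, Bool.or_eq_true] at h
    by_cases hc : PySem.Str.isIn ch r = true
    · right; simp at hc; simp [hc]
    · rcases h with (h | h) | h
      · exact absurd h hc
      · left; exact h
      · right; simp at hc; simp [hc, h]

-- ===== VERDICT (by name: the statement is the Claim_ definition above) =====
theorem displayPathtoPrincess_spec : Claim_equal_displayPathtoPrincess := by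
  intro n grid _ hpre
  obtain ⟨hp, hm⟩ := hpre
  unfold Spec_displayPathtoPrincess displayPathtoPrincess displayPathtoPrincess_alt
  have h1 : (pvFindLast grid "p").isSome := pvFindLast_isSome grid "p" 0 none (Or.inl hp)
  have h2 : (pvFindLast grid "m").isSome := pvFindLast_isSome grid "m" 0 none (Or.inl hm)
  obtain ⟨pr, hpr⟩ := Option.isSome_iff_exists.mp h1
  obtain ⟨bt, hbt⟩ := Option.isSome_iff_exists.mp h2
  rw [pvScanA_split, hpr, hbt]
  simp only
  rw [pvWalk_eq, pvWalk_eq]
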